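-- pv_equiv track=rewrite | github.com/arksch/zwitscher | zwitscher/features.py | chunk_connective
-- ===== SOURCE A (Python) =====
-- def chunk_connective(nested_connective_positions):
--     """ Helper to chunk a connective into its continuous parts
--
--     :param nested_connective_positions: list of pairs of (sent_index, token_index)
--     :type nested_connective_positions: list
--     :return: list of chunks, each chunk is a list of pairs of (sent_index, token_index)
--     :rtype: list
--     """
--     chunks = []
--     current_chunk = []
--     nested_connective_positions = sorted(nested_connective_positions)
--     for i in range(0, len(nested_connective_positions)):
--         # Finding all the words in the sentence and
--         if not current_chunk:
--             current_chunk.append(nested_connective_positions[i])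
--         else:
--             if nested_connective_positions[i - 1][0] != nested_connective_positions[i][0]:
--                 # Crossed sentence boundary
--                 chunks.append(current_chunk)
--                 current_chunk = [nested_connective_positions[i]]
--             else:
--                 if nested_connective_positions[i - 1][1] + 1 != nested_connective_positions[i][1]:
--                     # Skipped words
--                     chunks.append(current_chunk)
--                     current_chunk = [nested_connective_positions[i]]
--                 else:
--                     # We are continuing our connective
--                     current_chunk.append(nested_connective_positions[i])
--     chunks.append(current_chunk)
--     return chunks
-- ===== SOURCE B (Python) =====
-- def chunk_connective(nested_connective_positions):
--     """Boundaries-then-slices: find the indices where a new chunk starts, then slice."""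
--     s = sorted(nested_connective_positions)
--     n = len(s)
--     cuts = [0]
--     for i in range(1, n):
--         if s[i - 1][0] != s[i][0] or s[i - 1][1] + 1 != s[i][1]:
--             cuts.append(i)
--     cuts.append(n)
--     return [s[a:b] for a, b in zip(cuts, cuts[1:])]
-- ===== Notes on version B (the rewrite author's own statement) =====
-- stated objective: alternative
-- what changed: Replaces A's accumulate-and-flush loop (building each chunk incrementally and flushing it at boundaries) by a boundaries-then-slices decomposition: one pass records the cut indices where a new chunk starts, then the chunks are produced by slicing the sorted list between consecutive cuts.
import Mathlib
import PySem

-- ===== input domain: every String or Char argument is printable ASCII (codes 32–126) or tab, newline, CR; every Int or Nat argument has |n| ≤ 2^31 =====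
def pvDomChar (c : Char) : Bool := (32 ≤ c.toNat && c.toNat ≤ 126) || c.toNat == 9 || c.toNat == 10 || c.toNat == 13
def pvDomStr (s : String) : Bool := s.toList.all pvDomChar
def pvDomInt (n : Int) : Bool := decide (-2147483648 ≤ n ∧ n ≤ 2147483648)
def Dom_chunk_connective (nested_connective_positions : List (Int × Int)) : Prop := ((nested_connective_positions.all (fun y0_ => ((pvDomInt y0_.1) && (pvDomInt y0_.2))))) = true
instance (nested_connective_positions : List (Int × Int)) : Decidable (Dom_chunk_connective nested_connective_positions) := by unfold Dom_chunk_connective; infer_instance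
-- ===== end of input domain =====

-- B replaces A's accumulate-and-flush loop by a boundaries-then-slices decomposition:
-- collect the cut indices where a new chunk starts, then slice the sorted list between them.

-- ===== PORT A =====
-- the body of A's `for i in range(0, len(s))` loop (indices are always in range,
-- and s[i-1] is only read when current_chunk is nonempty, i.e. i ≥ 1, as in the Python)
def chunkStepA (s : List (Int × Int)) (acc : List (List (Int × Int)) × List (Int × Int))
    (i : Int) : List (List (Int × Int)) × List (Int × Int) :=
  if acc.2 = [] then
    (acc.1, acc.2 ++ [PySem.List.pyGetD s i (0, 0)])
  else if (PySem.List.pyGetD s (i - 1) (0, 0)).1 ≠ (PySem.List.pyGetD s i (0, 0)).1 then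
    -- Crossed sentence boundary
    (acc.1 ++ [acc.2], [PySem.List.pyGetD s i (0, 0)])
  else if (PySem.List.pyGetD s (i - 1) (0, 0)).2 + 1 ≠ (PySem.List.pyGetD s i (0, 0)).2 then
    -- Skipped words
    (acc.1 ++ [acc.2], [PySem.List.pyGetD s i (0, 0)])
  else
    -- We are continuing our connective
    (acc.1, acc.2 ++ [PySem.List.pyGetD s i (0, 0)])

def chunk_connective (nested_connective_positions : List (Int × Int)) : List (List (Int × Int)) :=
  let s := PySem.List.sorted2 nested_connective_positions (fun x => x.1) (fun x => x.2)
  let st := (PySem.List.pyRange 0 (s.length : Int) 1).foldl (chunkStepA s) ([], [])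
  st.1 ++ [st.2]

-- ===== PORT B =====
-- the body of Source B's `for i in range(1, n)` loop: append cut index i at a chunk boundary
def cutStepB (s : List (Int × Int)) (cs : List Int) (i : Int) : List Int :=
  if (PySem.List.pyGetD s (i - 1) (0, 0)).1 ≠ (PySem.List.pyGetD s i (0, 0)).1 ∨
     (PySem.List.pyGetD s (i - 1) (0, 0)).2 + 1 ≠ (PySem.List.pyGetD s i (0, 0)).2 then
    cs ++ [i]
  else cs

def chunk_connective_alt (nested_connective_positions : List (Int × Int)) : List (List (Int × Int)) :=
  let s := PySem.List.sorted2 nested_connective_positions (fun x => x.1) (fun x => x.2)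
  let n : Int := (s.length : Int)
  let cuts := ((PySem.List.pyRange 1 n 1).foldl (cutStepB s) [0]) ++ [n]
  -- zip(cuts, cuts[1:]) and slice s[a:b]
  (cuts.zip (PySem.List.slice cuts (some 1) none)).map
    (fun ab => PySem.List.slice s (some ab.1) (some ab.2))

-- ===== PRECONDITION & SPEC =====
def Spec_chunk_connective (nested_connective_positions : List (Int × Int)) (out : List (List (Int × Int))) : Prop := out = chunk_connective_alt nested_connective_positions
instance (nested_connective_positions : List (Int × Int)) (out : List (List (Int × Int))) : Decidable (Spec_chunk_connective nested_connective_positions out) := by unfold Spec_chunk_connective; infer_instance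

-- ===== CLAIM (what is proved, stated in full; the proofs are below) =====
def Claim_equal_chunk_connective : Prop := ∀ (nested_connective_positions : List (Int × Int)), Dom_chunk_connective nested_connective_positions → Spec_chunk_connective nested_connective_positions (chunk_connective nested_connective_positions)

-- ===== LEMMAS AND PROOFS =====

-- adjacent pairs of l ++ [b]: those of l plus (l.getLast, b)
theorem zip_tail_append {α : Type} : ∀ (l : List α) (hl : l ≠ []) (b : α),
    (l ++ [b]).zip (l ++ [b]).tail = l.zip l.tail ++ [(l.getLast hl, b)]
  | [x], _, b => by simp
  | x :: y :: l', _, b => by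
    have ih := zip_tail_append (y :: l') (by simp) b
    simp only [List.cons_append, List.tail_cons, List.zip_cons_cons] at ih ⊢
    rw [ih]
    simp [List.getLast]

-- the loop invariant: after processing indices 0..k (A) resp. 1..k (B),
-- A's flushed chunks are B's slices between the cuts found so far, and A's
-- current chunk is the slice from the last cut to k+1
theorem chunk_loop_inv (s : List (Int × Int)) : ∀ (k : Nat), k + 1 ≤ s.length →
    ∃ (cs : List Int) (c : Nat) (hcs : cs ≠ []),
      (PySem.List.pyRange 1 ((k : Int) + 1) 1).foldl (cutStepB s) [0] = cs ∧
      cs.getLast hcs = (c : Int) ∧ c ≤ k ∧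
      (PySem.List.pyRange 0 ((k : Int) + 1) 1).foldl (chunkStepA s) ([], []) =
        ((cs.zip cs.tail).map (fun ab => PySem.List.slice s (some ab.1) (some ab.2)),
         PySem.List.slice s (some (c : Int)) (some ((k : Int) + 1))) := by
  intro k
  induction k with
  | zero =>
    intro hlen
    cases s with
    | nil => simp at hlen
    | cons a t =>
      refine ⟨[0], 0, by simp, ?_, by simp, le_refl 0, ?_⟩
      · rw [PySem.List.pyRange_one_eq_nil (by norm_num)]
        rfl
      · have h1 : PySem.List.pyRange 0 (((0 : Nat) : Int) + 1) 1 = [0] := by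
          rw [Nat.cast_zero]
          exact PySem.List.pyRange_one_singleton 0
        rw [h1]
        simp only [List.foldl_cons, List.foldl_nil, chunkStepA, List.nil_append]
        have h2 : PySem.List.slice (a :: t) (some ((0 : Nat) : Int)) (some (((0 : Nat) : Int) + 1))
            = [a] := by
          rw [show (((0 : Nat) : Int) + 1) = ((1 : Nat) : Int) by simp, PySem.List.slice_natCast]
          rfl
        rw [h2]
        simp [PySem.List.pyGetD_zero_cons]
  | succ k ih =>
    intro hlen
    obtain ⟨cs, c, hcs, hB, hlast, hck, hA⟩ := ih (by omega)
    have hk1 : k + 1 < s.length := by omega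
    have hk : k < s.length := by omega
    have hc1 : ((k + 1 : Nat) : Int) = (k : Int) + 1 := by push_cast; ring
    -- peel the new index k+1 off both ranges
    have hcast : ((k + 1 : Nat) : Int) + 1 = ((k : Int) + 1) + 1 := by push_cast; ring
    have hrA : PySem.List.pyRange 0 (((k + 1 : Nat) : Int) + 1) 1
        = PySem.List.pyRange 0 ((k : Int) + 1) 1 ++ [(k : Int) + 1] := by
      rw [hcast, PySem.List.pyRange_one_succ_right (by omega)]
    have hrB : PySem.List.pyRange 1 (((k + 1 : Nat) : Int) + 1) 1
        = PySem.List.pyRange 1 ((k : Int) + 1) 1 ++ [(k : Int) + 1] := by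
      rw [hcast, PySem.List.pyRange_one_succ_right (by omega)]
    -- the two elements the new iteration looks at
    have hgp : PySem.List.pyGetD s ((k : Int) + 1 - 1) (0, 0) = s[k] := by
      have : (k : Int) + 1 - 1 = ((k : Nat) : Int) := by ring
      rw [this, PySem.List.pyGetD_natCast, List.getD_eq_getElem _ _ hk]
    have hgq : PySem.List.pyGetD s ((k : Int) + 1) (0, 0) = s[k + 1] := by
      rw [← hc1, PySem.List.pyGetD_natCast, List.getD_eq_getElem _ _ hk1]
    -- A's current chunk is a nonempty slice
    have hslice : PySem.List.slice s (some (c : Int)) (some ((k : Int) + 1))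
        = (s.drop c).take (k + 1 - c) := by
      rw [← hc1, PySem.List.slice_natCast]
    have hcurne : PySem.List.slice s (some (c : Int)) (some ((k : Int) + 1)) ≠ [] := by
      rw [hslice]
      intro hnil
      have := congrArg List.length hnil
      simp at this
      omega
    -- the new current chunk when the run continues
    have hext : PySem.List.slice s (some (c : Int)) (some (((k : Int) + 1) + 1))
        = PySem.List.slice s (some (c : Int)) (some ((k : Int) + 1)) ++ [s[k + 1]] := by
      have h2 : ((k : Int) + 1) + 1 = ((k + 2 : Nat) : Int) := by push_cast; ring
      rw [h2, PySem.List.slice_natCast, hslice]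
      have harith : k + 2 - c = (k + 1 - c) + 1 := by omega
      rw [harith, List.take_add_one]
      have : (s.drop c)[k + 1 - c]? = s[k + 1]? := by
        rw [List.getElem?_drop]
        congr 1
        omega
      rw [this, List.getElem?_eq_getElem hk1]
      rfl
    -- the new current chunk when a new run starts
    have hsingle : PySem.List.slice s (some ((k : Int) + 1)) (some (((k : Int) + 1) + 1))
        = [s[k + 1]] := by
      have h2 : ((k : Int) + 1) + 1 = ((k + 2 : Nat) : Int) := by push_cast; ring
      rw [h2, ← hc1, PySem.List.slice_natCast, List.drop_eq_getElem_cons hk1]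
      have : k + 2 - (k + 1) = 1 := by omega
      rw [this]
      rfl
    rw [hrA, hrB, List.foldl_append, List.foldl_append, hA, hB, hcast]
    simp only [List.foldl_cons, List.foldl_nil]
    by_cases h1 : s[k].1 = s[k + 1].1
    · by_cases h2 : s[k].2 + 1 = s[k + 1].2
      · -- run continues: no new cut, A extends the current chunk
        refine ⟨cs, c, hcs, ?_, hlast, by omega, ?_⟩
        · simp only [cutStepB, hgp, hgq]
          simp [h1, h2]
        · simp only [chunkStepA, hgp, hgq, if_neg hcurne]
          rw [if_neg (by simp [h1]), if_neg (by simp [h2]), hext]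
      · -- skipped words: new cut at k+1, A flushes the current chunk
        refine ⟨cs ++ [(k : Int) + 1], k + 1, by simp, ?_, ?_, le_refl _, ?_⟩
        · simp only [cutStepB, hgp, hgq]
          simp [h2]
        · push_cast
          simp
        · push_cast
          simp only [chunkStepA, hgp, hgq, if_neg hcurne]
          rw [if_neg (by simp [h1]), if_pos h2, zip_tail_append cs hcs ((k : Int) + 1), hlast,
            hsingle]
          simp
    · -- crossed sentence boundary: new cut at k+1, A flushes the current chunk
      refine ⟨cs ++ [(k : Int) + 1], k + 1, by simp, ?_, ?_, le_refl _, ?_⟩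
      · simp only [cutStepB, hgp, hgq]
        simp [h1]
      · push_cast
        simp
      · push_cast
        simp only [chunkStepA, hgp, hgq, if_neg hcurne]
        rw [if_pos h1, zip_tail_append cs hcs ((k : Int) + 1), hlast, hsingle]
        simp

-- ===== VERDICT (by name: the statement is the Claim_ definition above) =====
theorem chunk_connective_spec : Claim_equal_chunk_connective := by
  intro xs _
  unfold Spec_chunk_connective chunk_connective chunk_connective_alt
  cases hs : PySem.List.sorted2 xs (fun x => x.1) (fun x => x.2) with
  | nil => decide
  | cons h t =>
    have hn : (((h :: t).length : Nat) : Int) = ((t.length : Nat) : Int) + 1 := by simp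
    obtain ⟨cs, c, hcs, hB, hlast, hck, hA⟩ := chunk_loop_inv (h :: t) t.length (by simp)
    simp only [hn, hA, hB]
    rw [PySem.List.slice_from_one, zip_tail_append cs hcs ((t.length : Int) + 1), hlast]
    simp
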